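-- pv_equiv track=rewrite | github.com/aayush-m-23/Compiler-and-transpiler | transpiler_backend.py | transpile_to_c
-- ===== SOURCE A (Python) =====
-- def indent(level):
--     return ' ' * (4 * level)
--
-- def get_indent(line):
--     """Return indentation level (4 spaces per indent)."""
--     return (len(line) - len(line.lstrip(' '))) // 4
--
-- def transpile_to_c(source_code):
--     lines = source_code.strip('\n').splitlines()
--     output = ['#include <stdio.h>', '', 'int main() {']
--     indent_level = 1
--     block_stack = []
--     prev_indent = 0
--
--     for i, raw_line in enumerate(lines):
--         line = raw_line.strip()
--         current_indent = get_indent(raw_line)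
--         next_line = lines[i + 1].strip() if i + 1 < len(lines) else ""
--
--         if line != "else":
--             while block_stack and current_indent < prev_indent:
--                 indent_level -= 1
--                 block_stack.pop()
--                 output.append(f"{indent(indent_level)}}}")
--                 prev_indent -= 1
--
--         if line.startswith("let "):
--             var, val = map(str.strip, line[4:].split('=', 1))
--             output.append(f"{indent(indent_level)}int {var} = {val};")
--         elif line.startswith("print "):
--             output.append(f"{indent(indent_level)}printf(\"%d\\n\", {line[6:].strip()});")
--         elif line.startswith("if "):
--             output.append(f"{indent(indent_level)}if ({line[3:].strip()}) {{")
--             block_stack.append("if")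
--             indent_level += 1
--             prev_indent = current_indent + 1
--         elif line == "else":
--             indent_level -= 1
--             output.append(f"{indent(indent_level)}}} else {{")
--             indent_level += 1
--             prev_indent = current_indent + 1
--         elif line.lower().startswith("for "):
--             parts = line[4:].split('=')
--             var = parts[0].strip()
--             start, end = map(str.strip, parts[1].replace("to", ",").split(','))
--             output.append(f"{indent(indent_level)}for (int {var} = {start}; {var} < {end}; {var}++) {{")
--             block_stack.append("for")
--             indent_level += 1
--             prev_indent = current_indent + 1
--         elif line.startswith("while "):
--             output.append(f"{indent(indent_level)}while ({line[6:].strip()}) {{")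
--             block_stack.append("while")
--             indent_level += 1
--             prev_indent = current_indent + 1
--         else:
--             output.append(f"{indent(indent_level)}// Unsupported: {line}")
--             prev_indent = current_indent
--
--     while block_stack:
--         indent_level -= 1
--         block_stack.pop()
--         output.append(f"{indent(indent_level)}}}")
--
--     output.append(f"{indent(1)}return 0;")
--     output.append("}")
--     return '\n'.join(output)
-- ===== SOURCE B (Python) =====
-- def transpile_to_c(source_code):
--     lines = source_code.strip('\n').splitlines()
--
--     def parse(line):
--         """Parse one stripped line into a statement tuple."""
--         if line.startswith("let "):
--             var, val = line[4:].split('=', 1)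
--             return ('let', var.strip(), val.strip())
--         if line.startswith("print "):
--             return ('print', line[6:].strip())
--         if line.startswith("if "):
--             return ('if', line[3:].strip())
--         if line == "else":
--             return ('else',)
--         if line.lower().startswith("for "):
--             parts = line[4:].split('=')
--             start, end = parts[1].replace("to", ",").split(',')
--             return ('for', parts[0].strip(), start.strip(), end.strip())
--         if line.startswith("while "):
--             return ('while', line[6:].strip())
--         return ('other', line)
--
--     def render(stmt, pad):
--         k = stmt[0]
--         if k == 'let':
--             return f"{pad}int {stmt[1]} = {stmt[2]};"
--         if k == 'print':
--             return f'{pad}printf("%d\\n", {stmt[1]});'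
--         if k == 'if':
--             return f"{pad}if ({stmt[1]}) {{"
--         if k == 'for':
--             return f"{pad}for (int {stmt[1]} = {stmt[2]}; {stmt[1]} < {stmt[3]}; {stmt[1]}++) {{"
--         if k == 'while':
--             return f"{pad}while ({stmt[1]}) {{"
--         return f"{pad}// Unsupported: {stmt[1]}"
--
--     def go(items, depth, prev):
--         if not items:
--             return ["    " * d + "}" for d in range(depth, 0, -1)]
--         raw, rest = items[0], items[1:]
--         line = raw.strip()
--         cur = (len(raw) - len(raw.lstrip(' '))) // 4
--         stmt = parse(line)
--         if stmt[0] == 'else':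
--             return ["    " * depth + "} else {"] + go(rest, depth, cur + 1)
--         closes = min(depth, prev - cur) if prev > cur else 0
--         closing = ["    " * d + "}" for d in range(depth, depth - closes, -1)]
--         depth -= closes
--         opens = stmt[0] in ('if', 'for', 'while')
--         new_prev = cur + 1 if opens else (cur if stmt[0] == 'other' else prev - closes)
--         return closing + [render(stmt, "    " * (depth + 1))] + go(rest, depth + (1 if opens else 0), new_prev)
--
--     header = ['#include <stdio.h>', '', 'int main() {']
--     return '\n'.join(header + go(lines, 0, 0) + ["    return 0;", "}"])
-- ===== Notes on version B (the rewrite author's own statement) =====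
-- stated objective: alternative
-- what changed: B replaces A's running state machine (indent_level counter, block_stack list, one-brace-per-iteration inner while loop, enumerate with an unused next_line) by a parse/render decomposition: each stripped line is parsed into a statement tuple, a single recursion over the lines carries only (depth, prev) and emits the dedent braces in one batch via a closed-form count min(depth, prev-cur).
import Mathlib
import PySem

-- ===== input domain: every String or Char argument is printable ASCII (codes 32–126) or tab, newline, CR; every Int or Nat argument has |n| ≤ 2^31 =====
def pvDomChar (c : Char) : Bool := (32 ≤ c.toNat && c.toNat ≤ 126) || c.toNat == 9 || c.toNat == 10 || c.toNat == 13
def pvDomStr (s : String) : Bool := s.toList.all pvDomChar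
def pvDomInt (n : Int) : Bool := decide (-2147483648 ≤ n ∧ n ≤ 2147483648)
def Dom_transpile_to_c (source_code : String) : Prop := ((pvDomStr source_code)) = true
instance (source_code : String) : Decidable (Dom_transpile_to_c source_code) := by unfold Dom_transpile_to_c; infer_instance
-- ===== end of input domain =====

-- B re-implements the transpiler as parse-each-line-to-a-statement + render + one recursion with a
-- closed-form dedent count, replacing A's block_stack/indent_level/while-pop state machine; objective:
-- alternative decomposition (same observable output, not claimed faster).

-- ===== PORT A =====

-- indent(level) = ' ' * (4 * level)  (Python's * clamps negative counts to 0; exact)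
def pvIndent (level : Int) : String := String.mk (List.replicate (4 * level).toNat ' ')

-- get_indent(line) = (len(line) - len(line.lstrip(' '))) // 4 : the count of leading ' ' chars,
-- divided by 4 (both nonneg, so Nat division is Python's //).  lstrip(' ') = dropWhile (· = ' '), exact.
def pvGetIndent (raw : String) : Int :=
  (((raw.toList.length - (raw.toList.dropWhile (· == ' ')).length) / 4 : Nat) : Int)

-- the inner `while block_stack and current_indent < prev_indent:` loop (state: output, indent_level, block_stack, prev_indent)
def pvPopLoop (output : List String) (level : Int) (stack : List String) (prev cur : Int) :
    List String × Int × List String × Int :=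
  match stack with
  | [] => (output, level, stack, prev)
  | _ :: rest =>
    if cur < prev then
      pvPopLoop (output ++ [pvIndent (level - 1) ++ "}"]) (level - 1) rest (prev - 1) cur
    else (output, level, stack, prev)

-- the main `for i, raw_line in enumerate(lines):` loop; block_stack append/pop at the end is modeled
-- by cons/tail (same LIFO discipline, only membership/length are ever used)
def pvLoopA : List String → List String → Int → List String → Int → List String × Int × List String
  | [], output, level, stack, _prev => (output, level, stack)
  | raw :: rest, output, level, stack, prev =>
    let line := PySem.Str.strip raw
    let cur := pvGetIndent raw
    let _next_line := match rest with | [] => "" | x :: _ => PySem.Str.strip x  -- computed by A, never used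
    match (if line ≠ "else" then pvPopLoop output level stack prev cur else (output, level, stack, prev)) with
    | (output, level, stack, prev) =>
      if PySem.Str.startswith line "let " then
        match PySem.Str.splitMax? (PySem.Str.slice line (some 4) none) "=" 1 with
        | some [v, w] =>
          pvLoopA rest (output ++ [pvIndent level ++ "int " ++ PySem.Str.strip v ++ " = " ++ PySem.Str.strip w ++ ";"]) level stack prev
        | _ => pvLoopA rest output level stack prev   -- Python raises ValueError here; excluded by Pre_
      else if PySem.Str.startswith line "print " then
        pvLoopA rest (output ++ [pvIndent level ++ "printf(\"%d\\n\", " ++ PySem.Str.strip (PySem.Str.slice line (some 6) none) ++ ");"]) level stack prev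
      else if PySem.Str.startswith line "if " then
        pvLoopA rest (output ++ [pvIndent level ++ "if (" ++ PySem.Str.strip (PySem.Str.slice line (some 3) none) ++ ") {"]) (level + 1) ("if" :: stack) (cur + 1)
      else if line = "else" then
        pvLoopA rest (output ++ [pvIndent (level - 1) ++ "} else {"]) ((level - 1) + 1) stack (cur + 1)
      else if PySem.Str.startswith (PySem.Str.lower line) "for " then
        match PySem.Str.split? (PySem.Str.slice line (some 4) none) "=" with
        | some (p0 :: p1 :: _) =>
          match PySem.Str.split? (PySem.Str.replace p1 "to" ",") "," with
          | some [s, e] =>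
            pvLoopA rest (output ++ [pvIndent level ++ "for (int " ++ PySem.Str.strip p0 ++ " = " ++ PySem.Str.strip s ++ "; " ++ PySem.Str.strip p0 ++ " < " ++ PySem.Str.strip e ++ "; " ++ PySem.Str.strip p0 ++ "++) {"]) (level + 1) ("for" :: stack) (cur + 1)
          | _ => pvLoopA rest output level stack prev   -- Python raises ValueError; excluded by Pre_
        | _ => pvLoopA rest output level stack prev     -- Python raises IndexError; excluded by Pre_
      else if PySem.Str.startswith line "while " then
        pvLoopA rest (output ++ [pvIndent level ++ "while (" ++ PySem.Str.strip (PySem.Str.slice line (some 6) none) ++ ") {"]) (level + 1) ("while" :: stack) (cur + 1)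
      else
        pvLoopA rest (output ++ [pvIndent level ++ "// Unsupported: " ++ line]) level stack cur

-- the trailing `while block_stack:` drain
def pvDrainA : List String → Int → List String → List String
  | output, _level, [] => output
  | output, level, _ :: rest => pvDrainA (output ++ [pvIndent (level - 1) ++ "}"]) (level - 1) rest

def transpile_to_c (source_code : String) : String :=
  let lines := PySem.Str.splitlines (PySem.Str.stripChars source_code "\n")
  let output := ["#include <stdio.h>", "", "int main() {"]
  match pvLoopA lines output 1 [] 0 with
  | (output, level, stack) =>
    let output := pvDrainA output level stack
    PySem.Str.join "\n" (output ++ [pvIndent 1 ++ "return 0;", "}"])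

-- ===== PORT B =====

inductive PvStmt where
  | slet : String → String → PvStmt
  | sprint : String → PvStmt
  | sif : String → PvStmt
  | selse : PvStmt
  | sfor : String → String → String → PvStmt
  | swhile : String → PvStmt
  | other : String → PvStmt
deriving DecidableEq, Repr

def pvParse (line : String) : PvStmt :=
  if PySem.Str.startswith line "let " then
    match PySem.Str.splitMax? (PySem.Str.slice line (some 4) none) "=" 1 with
    | some [v, w] => .slet (PySem.Str.strip v) (PySem.Str.strip w)
    | _ => .other line   -- Python raises ValueError here; excluded by Pre_
  else if PySem.Str.startswith line "print " then .sprint (PySem.Str.strip (PySem.Str.slice line (some 6) none))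
  else if PySem.Str.startswith line "if " then .sif (PySem.Str.strip (PySem.Str.slice line (some 3) none))
  else if line = "else" then .selse
  else if PySem.Str.startswith (PySem.Str.lower line) "for " then
    match PySem.Str.split? (PySem.Str.slice line (some 4) none) "=" with
    | some (p0 :: p1 :: _) =>
      match PySem.Str.split? (PySem.Str.replace p1 "to" ",") "," with
      | some [s, e] => .sfor (PySem.Str.strip p0) (PySem.Str.strip s) (PySem.Str.strip e)
      | _ => .other line   -- Python raises ValueError; excluded by Pre_
    | _ => .other line     -- Python raises IndexError; excluded by Pre_
  else if PySem.Str.startswith line "while " then .swhile (PySem.Str.strip (PySem.Str.slice line (some 6) none))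
  else .other line

def pvRender (stmt : PvStmt) (pad : String) : String :=
  match stmt with
  | .slet v w => pad ++ "int " ++ v ++ " = " ++ w ++ ";"
  | .sprint e => pad ++ "printf(\"%d\\n\", " ++ e ++ ");"
  | .sif c => pad ++ "if (" ++ c ++ ") {"
  | .sfor v s e => pad ++ "for (int " ++ v ++ " = " ++ s ++ "; " ++ v ++ " < " ++ e ++ "; " ++ v ++ "++) {"
  | .swhile c => pad ++ "while (" ++ c ++ ") {"
  | .selse => pad   -- never called on 'else' (go handles it before rendering)
  | .other t => pad ++ "// Unsupported: " ++ t

def pvOpens (stmt : PvStmt) : Bool :=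
  match stmt with
  | .sif _ | .sfor _ _ _ | .swhile _ => true
  | _ => false

-- "    " * d  (Python string repetition; negative d gives "")
def pvPad (d : Int) : String := String.mk (List.replicate d.toNat "    ".toList).flatten

-- ["    " * d + "}" for d in range(depth, depth - closes, -1)]
def pvCloseList (depth closes : Int) : List String :=
  (PySem.List.pyRange depth (depth - closes) (-1)).map (fun d => pvPad d ++ "}")

def pvGo : List String → Int → Int → List String
  | [], depth, _prev => pvCloseList depth depth
  | raw :: rest, depth, prev =>
    let line := PySem.Str.strip raw
    let cur := pvGetIndent raw
    let stmt := pvParse line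
    if stmt = PvStmt.selse then
      (pvPad depth ++ "} else {") :: pvGo rest depth (cur + 1)
    else
      let closes : Int := if prev > cur then min depth (prev - cur) else 0
      let depth' := depth - closes
      let newPrev : Int :=
        if pvOpens stmt then cur + 1
        else match stmt with
             | .other _ => cur
             | _ => prev - closes
      pvCloseList depth closes ++
        pvRender stmt (pvPad (depth' + 1)) :: pvGo rest (depth' + (if pvOpens stmt then 1 else 0)) newPrev

def transpile_to_c_alt (source_code : String) : String :=
  let lines := PySem.Str.splitlines (PySem.Str.stripChars source_code "\n")
  PySem.Str.join "\n"
    (["#include <stdio.h>", "", "int main() {"] ++ pvGo lines 0 0 ++ ["    return 0;", "}"])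

-- ===== PRECONDITION & SPEC =====

-- a `let` line must split into exactly two pieces at the first '=' (i.e. contain an '='), else Python raises ValueError
def pvLetOK (line : String) : Bool :=
  match PySem.Str.splitMax? (PySem.Str.slice line (some 4) none) "=" 1 with
  | some [_, _] => true
  | _ => false

-- a `for` line must have an '=' and split into exactly two pieces at ',' after parts[1].replace("to", ","), else Python raises
def pvForOK (line : String) : Bool :=
  match PySem.Str.split? (PySem.Str.slice line (some 4) none) "=" with
  | some (_ :: p1 :: _) =>
    match PySem.Str.split? (PySem.Str.replace p1 "to" ",") "," with
    | some [_, _] => true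
    | _ => false
  | _ => false

def pvLineOK (line : String) : Bool :=
  (!(PySem.Str.startswith line "let ") || pvLetOK line) &&
  (!(PySem.Str.startswith (PySem.Str.lower line) "for ") || pvForOK line)

-- Pre_ excludes exactly the inputs where A raises (ValueError/IndexError on a malformed `let`/`for` line);
-- B raises on the same inputs.
def Pre_transpile_to_c (source_code : String) : Prop :=
  ∀ raw ∈ PySem.Str.splitlines (PySem.Str.stripChars source_code "\n"),
    pvLineOK (PySem.Str.strip raw) = true
instance (source_code : String) : Decidable (Pre_transpile_to_c source_code) := by
  unfold Pre_transpile_to_c; infer_instance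

def pvWitness_transpile_to_c : String := "let x = 1\nif x\n    print x\nfor i = 1 to 5"

def Spec_transpile_to_c (source_code : String) (out : String) : Prop := out = transpile_to_c_alt source_code
instance (source_code : String) (out : String) : Decidable (Spec_transpile_to_c source_code out) := by
  unfold Spec_transpile_to_c; infer_instance

-- ===== CLAIM (what is proved, stated in full; the proofs are below) =====
def Claim_equal_transpile_to_c : Prop := ∀ (source_code : String), Dom_transpile_to_c source_code → Pre_transpile_to_c source_code → Spec_transpile_to_c source_code (transpile_to_c source_code)

-- ===== LEMMAS AND PROOFS =====

theorem pv_flatten_replicate (k : Nat) : (List.replicate k [' ',' ',' ',' ']).flatten = List.replicate (4*k) ' ' := by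
  induction k with
  | zero => simp
  | succ n ih =>
    rw [List.replicate_succ, List.flatten_cons, ih, show 4*(n+1) = 4+4*n by omega, List.replicate_add]
    rfl

theorem pv_pad_eq (n : Int) : pvPad n = pvIndent n := by
  unfold pvPad pvIndent
  rw [show "    ".toList = [' ',' ',' ',' '] from rfl, pv_flatten_replicate,
    show (4*n).toNat = 4 * n.toNat by omega]

theorem pv_pyRange_neg_one (d : Int) (c : Nat) :
    PySem.List.pyRange d (d - c) (-1) = (List.range c).map (fun k : Nat => d - (k : Int)) := by
  unfold PySem.List.pyRange
  norm_num
  rcases Nat.eq_zero_or_pos c with h | h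
  · simp [h]
  · rw [if_pos h]
    apply List.map_congr_left; intro k hk; ring

theorem pv_closeList_eq (d : Int) (c : Nat) :
    pvCloseList d c = (List.range c).map (fun k : Nat => pvIndent (d - (k : Int)) ++ "}") := by
  unfold pvCloseList
  rw [pv_pyRange_neg_one, List.map_map]
  apply List.map_congr_left; intro k hk; simp [pv_pad_eq]

theorem pv_range_succ_map {α : Type} (f : Nat → α) (c : Nat) :
    (List.range (c+1)).map f = f 0 :: (List.range c).map (fun k => f (k+1)) := by
  rw [List.range_succ_eq_map, List.map_cons, List.map_map]
  rfl

theorem pv_brace_congr (a b : Int) (h : a = b) :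
    pvIndent a ++ "}" = pvIndent b ++ "}" := by rw [h]

-- the number of blocks A's inner while-loop closes
def pvCloses (len : Nat) (prev cur : Int) : Nat := min len (prev - cur).toNat

theorem pv_popLoop_eq (stack : List String) : ∀ (output : List String) (level prev cur : Int),
    pvPopLoop output level stack prev cur =
      (output ++ (List.range (pvCloses stack.length prev cur)).map (fun k : Nat => pvIndent (level - 1 - (k : Int)) ++ "}"),
       level - (pvCloses stack.length prev cur : Int),
       stack.drop (pvCloses stack.length prev cur),
       prev - (pvCloses stack.length prev cur : Int)) := by
  induction stack with
  | nil => intro output level prev cur; simp [pvPopLoop, pvCloses]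
  | cons s rest ih =>
    intro output level prev cur
    unfold pvPopLoop
    by_cases h : cur < prev
    · rw [if_pos h, ih]
      have hc : pvCloses (s :: rest).length prev cur = pvCloses rest.length (prev - 1) cur + 1 := by
        unfold pvCloses; simp; omega
      rw [hc, pv_range_succ_map]
      refine Prod.ext ?_ (Prod.ext (by push_cast; ring) (Prod.ext ?_ (by push_cast; ring)))
      · show output ++ [pvIndent (level-1) ++ "}"] ++ _ = output ++ (_ :: _)
        rw [List.append_assoc]
        congr 1
        rw [List.singleton_append]
        congr 1
        · exact pv_brace_congr _ _ (by norm_num)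
        · apply List.map_congr_left; intro k hk
          exact pv_brace_congr _ _ (by push_cast; ring_nf)
      · show List.drop _ rest = List.drop _ (s :: rest)
        rw [List.drop_succ_cons]
    · rw [if_neg h]
      have hc : pvCloses (s :: rest).length prev cur = 0 := by unfold pvCloses; omega
      rw [hc]
      simp

theorem pv_drain_eq (stack : List String) : ∀ (output : List String) (level : Int),
    pvDrainA output level stack =
      output ++ (List.range stack.length).map (fun k : Nat => pvIndent (level - 1 - (k : Int)) ++ "}") := by
  induction stack with
  | nil => intro output level; simp [pvDrainA]
  | cons s rest ih =>
    intro output level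
    unfold pvDrainA
    rw [ih]
    rw [show (s :: rest).length = rest.length + 1 from rfl, pv_range_succ_map, List.append_assoc]
    congr 1
    rw [List.singleton_append]
    congr 1
    · exact pv_brace_congr _ _ (by norm_num)
    · apply List.map_congr_left; intro k hk
      exact pv_brace_congr _ _ (by push_cast; ring)

def pvD (t : List String × Int × List String) : List String := pvDrainA t.1 t.2.1 t.2.2

theorem pv_loop_go (lines : List String)
    (hok : ∀ raw ∈ lines, pvLineOK (PySem.Str.strip raw) = true) :
    ∀ (output stack : List String) (prev : Int),
    pvD (pvLoopA lines output ((stack.length : Int) + 1) stack prev) =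
      output ++ pvGo lines (stack.length : Int) prev := by
  induction lines with
  | nil =>
    intro output stack prev
    show pvD (output, (stack.length : Int) + 1, stack) = _
    unfold pvD pvGo
    simp only
    rw [pv_drain_eq, pv_closeList_eq]
    congr 1
    apply List.map_congr_left; intro k hk
    exact pv_brace_congr _ _ (by ring)
  | cons raw rest ih =>
    intro output stack prev
    have hokh := hok raw (by simp)
    have hokt : ∀ r ∈ rest, pvLineOK (PySem.Str.strip r) = true := fun r hr => hok r (by simp [hr])
    by_cases hel : PySem.Str.strip raw = "else"
    · have hp : pvParse "else" = PvStmt.selse := rfl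
      have n1 : PySem.Str.startswith "else" "let " = false := rfl
      have n2 : PySem.Str.startswith "else" "print " = false := rfl
      have n3 : PySem.Str.startswith "else" "if " = false := rfl
      simp only [pvLoopA, pvGo, hel, hp, n1, n2, n3]
      norm_num
      rw [ih hokt (output ++ [pvIndent ↑stack.length ++ "} else {"]) stack (pvGetIndent raw + 1)]
      simp [pv_pad_eq]
    · -- line is not "else": A first runs the dedent while-loop
      simp only [pvLoopA, pvGo, ne_eq, hel]
      rw [pv_popLoop_eq]
      have hci : (if prev > pvGetIndent raw then min (↑stack.length : Int) (prev - pvGetIndent raw) else 0)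
          = (pvCloses stack.length prev (pvGetIndent raw) : Int) := by
        unfold pvCloses; split_ifs <;> omega
      have hcle : pvCloses stack.length prev (pvGetIndent raw) ≤ stack.length := Nat.min_le_left _ _
      have e1 : ((stack.length : Int) + 1) - (pvCloses stack.length prev (pvGetIndent raw) : Int)
          = ((stack.drop (pvCloses stack.length prev (pvGetIndent raw))).length : Int) + 1 := by
        simp [List.length_drop]; omega
      simp only [not_false_eq_true, if_true]
      set cur := pvGetIndent raw with hcur
      set c := pvCloses stack.length prev cur with hc
      set C := List.map (fun k : Nat => pvIndent (↑stack.length + 1 - 1 - ↑k) ++ "}") (List.range c) with hC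
      set D := List.drop c stack with hD
      have hD2 : ((D.length : Nat) : Int) = (stack.length : Int) - (c : Int) := by
        rw [hD]; simp [List.length_drop]; omega
      have hCC : C = (List.range c).map (fun k : Nat => pvIndent ((stack.length : Int) - (k : Int)) ++ "}") := by
        rw [hC]; exact List.map_congr_left (fun k hk => pv_brace_congr _ _ (by ring))
      by_cases hlet : PySem.Str.startswith (PySem.Str.strip raw) "let " = true
      · -- `let` line
        have hlok : pvLetOK (PySem.Str.strip raw) = true := by
          have h' := hokh; unfold pvLineOK at h'; rw [hlet] at h'; simp at h'; exact h'.1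
        rcases hsp : PySem.Str.splitMax? (PySem.Str.slice (PySem.Str.strip raw) (some 4)) "=" 1 with _ | l
        · exfalso; unfold pvLetOK at hlok; rw [hsp] at hlok; simp at hlok
        rcases l with _ | ⟨v, _ | ⟨w, _ | ⟨x, t⟩⟩⟩
        · exfalso; unfold pvLetOK at hlok; rw [hsp] at hlok; simp at hlok
        · exfalso; unfold pvLetOK at hlok; rw [hsp] at hlok; simp at hlok
        · have hpar : pvParse (PySem.Str.strip raw) = PvStmt.slet (PySem.Str.strip v) (PySem.Str.strip w) := by
            unfold pvParse; rw [hsp, if_pos hlet]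
          rw [if_pos hlet, hpar, hci]
          norm_num [pvOpens, pvRender]
          rw [if_neg (fun h => PvStmt.noConfusion h), e1, ih hokt, hD2, pv_closeList_eq, ← hCC]
          simp only [pv_pad_eq]
          simp [List.append_assoc]
        · exfalso; unfold pvLetOK at hlok; rw [hsp] at hlok; simp at hlok
      · -- not a `let` line
        by_cases hpr : PySem.Str.startswith (PySem.Str.strip raw) "print " = true
        · -- `print` line
          have hpar : pvParse (PySem.Str.strip raw)
              = PvStmt.sprint (PySem.Str.strip (PySem.Str.slice (PySem.Str.strip raw) (some 6) none)) := by
            unfold pvParse; rw [if_neg hlet, if_pos hpr]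
          rw [if_neg hlet, if_pos hpr, hpar, hci]
          norm_num [pvOpens, pvRender]
          rw [if_neg (fun h => PvStmt.noConfusion h), e1, ih hokt, hD2, pv_closeList_eq, ← hCC]
          simp only [pv_pad_eq]
          simp [List.append_assoc]
        · by_cases hif : PySem.Str.startswith (PySem.Str.strip raw) "if " = true
          · -- `if` line (opens a block)
            have hpar : pvParse (PySem.Str.strip raw)
                = PvStmt.sif (PySem.Str.strip (PySem.Str.slice (PySem.Str.strip raw) (some 3) none)) := by
              unfold pvParse; rw [if_neg hlet, if_neg hpr, if_pos hif]
            rw [if_neg hlet, if_neg hpr, if_pos hif, hpar, hci]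
            norm_num [pvOpens, pvRender]
            rw [if_neg (fun h => PvStmt.noConfusion h)]
            rw [show ((stack.length : Int) + 1 - (c : Int)) = ((stack.length : Int) - (c : Int) + 1) from by ring]
            have e2 : ((stack.length : Int) - (c : Int) + 1) + 1 = ((("if" :: D).length : Nat) : Int) + 1 := by
              simp [hD, List.length_drop]; omega
            rw [e2, ih hokt]
            have e3 : ((("if" :: D).length : Nat) : Int) = (stack.length : Int) - (c : Int) + 1 := by
              simp [hD, List.length_drop]; omega
            rw [e3, pv_closeList_eq, ← hCC]
            simp only [pv_pad_eq]
            simp [List.append_assoc]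
          · by_cases hfor : PySem.Str.startswith (PySem.Str.lower (PySem.Str.strip raw)) "for " = true
            · -- `for` line (opens a block)
              have hfok : pvForOK (PySem.Str.strip raw) = true := by
                have h' := hokh; unfold pvLineOK at h'; rw [hfor] at h'; simp at h'; exact h'.2
              rcases hsp : PySem.Str.split? (PySem.Str.slice (PySem.Str.strip raw) (some 4) none) "=" with _ | l
              · exfalso; unfold pvForOK at hfok; rw [hsp] at hfok; simp at hfok
              rcases l with _ | ⟨p0, _ | ⟨p1, tail⟩⟩
              · exfalso; unfold pvForOK at hfok; rw [hsp] at hfok; simp at hfok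
              · exfalso; unfold pvForOK at hfok; rw [hsp] at hfok; simp at hfok
              · rcases hsp2 : PySem.Str.split? (PySem.Str.replace p1 "to" ",") "," with _ | m
                · exfalso; unfold pvForOK at hfok; simp only [hsp, hsp2] at hfok; simp at hfok
                rcases m with _ | ⟨sx, _ | ⟨ex, _ | ⟨y, t2⟩⟩⟩
                · exfalso; unfold pvForOK at hfok; simp only [hsp, hsp2] at hfok; simp at hfok
                · exfalso; unfold pvForOK at hfok; simp only [hsp, hsp2] at hfok; simp at hfok
                · have hpar : pvParse (PySem.Str.strip raw)
                      = PvStmt.sfor (PySem.Str.strip p0) (PySem.Str.strip sx) (PySem.Str.strip ex) := by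
                    unfold pvParse
                    rw [if_neg hlet, if_neg hpr, if_neg hif, if_neg hel, if_pos hfor, hsp]
                    dsimp only
                    rw [hsp2]
                  rw [if_neg hlet, if_neg hpr, if_neg hif, if_neg not_false, if_pos hfor, hpar, hci]
                  norm_num [pvOpens, pvRender]
                  rw [hsp2]
                  norm_num
                  rw [if_neg (fun h => PvStmt.noConfusion h)]
                  rw [show ((stack.length : Int) + 1 - (c : Int)) = ((stack.length : Int) - (c : Int) + 1) from by ring]
                  have e2 : ((stack.length : Int) - (c : Int) + 1) + 1 = ((("for" :: D).length : Nat) : Int) + 1 := by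
                    simp [hD, List.length_drop]; omega
                  rw [e2, ih hokt]
                  have e3 : ((("for" :: D).length : Nat) : Int) = (stack.length : Int) - (c : Int) + 1 := by
                    simp [hD, List.length_drop]; omega
                  rw [e3, pv_closeList_eq, ← hCC]
                  simp only [pv_pad_eq]
                  simp [List.append_assoc]
                · exfalso; unfold pvForOK at hfok; simp only [hsp, hsp2] at hfok; simp at hfok
            · by_cases hwh : PySem.Str.startswith (PySem.Str.strip raw) "while " = true
              · -- `while` line (opens a block)
                have hpar : pvParse (PySem.Str.strip raw)
                    = PvStmt.swhile (PySem.Str.strip (PySem.Str.slice (PySem.Str.strip raw) (some 6) none)) := by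
                  unfold pvParse; rw [if_neg hlet, if_neg hpr, if_neg hif, if_neg hel, if_neg hfor, if_pos hwh]
                rw [if_neg hlet, if_neg hpr, if_neg hif, if_neg not_false, if_neg hfor, if_pos hwh, hpar, hci]
                norm_num [pvOpens, pvRender]
                rw [if_neg (fun h => PvStmt.noConfusion h)]
                rw [show ((stack.length : Int) + 1 - (c : Int)) = ((stack.length : Int) - (c : Int) + 1) from by ring]
                have e2 : ((stack.length : Int) - (c : Int) + 1) + 1 = ((("while" :: D).length : Nat) : Int) + 1 := by
                  simp [hD, List.length_drop]; omega
                rw [e2, ih hokt]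
                have e3 : ((("while" :: D).length : Nat) : Int) = (stack.length : Int) - (c : Int) + 1 := by
                  simp [hD, List.length_drop]; omega
                rw [e3, pv_closeList_eq, ← hCC]
                simp only [pv_pad_eq]
                simp [List.append_assoc]
              · -- unsupported line
                have hpar : pvParse (PySem.Str.strip raw) = PvStmt.other (PySem.Str.strip raw) := by
                  unfold pvParse; rw [if_neg hlet, if_neg hpr, if_neg hif, if_neg hel, if_neg hfor, if_neg hwh]
                rw [if_neg hlet, if_neg hpr, if_neg hif, if_neg not_false, if_neg hfor, if_neg hwh, hpar, hci]
                norm_num [pvOpens, pvRender]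
                rw [if_neg (fun h => PvStmt.noConfusion h), e1, ih hokt, hD2, pv_closeList_eq, ← hCC]
                simp only [pv_pad_eq]
                simp [List.append_assoc]

-- ===== VERDICT (by name: the statement is the Claim_ definition above) =====
theorem transpile_to_c_spec : Claim_equal_transpile_to_c := by
  unfold Claim_equal_transpile_to_c
  intro src _hdom hpre
  unfold Pre_transpile_to_c at hpre
  unfold Spec_transpile_to_c transpile_to_c transpile_to_c_alt
  show (match pvLoopA (PySem.Str.splitlines (PySem.Str.stripChars src "\n"))
      ["#include <stdio.h>", "", "int main() {"] 1 [] 0 with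
    | (output, level, stack) =>
      PySem.Str.join "\n" (pvDrainA output level stack ++ [pvIndent 1 ++ "return 0;", "}"])) =
    PySem.Str.join "\n" (["#include <stdio.h>", "", "int main() {"]
      ++ pvGo (PySem.Str.splitlines (PySem.Str.stripChars src "\n")) 0 0 ++ ["    return 0;", "}"])
  have h := pv_loop_go (PySem.Str.splitlines (PySem.Str.stripChars src "\n")) hpre
    ["#include <stdio.h>", "", "int main() {"] [] 0
  norm_num at h
  rcases hE : pvLoopA (PySem.Str.splitlines (PySem.Str.stripChars src "\n"))
      ["#include <stdio.h>", "", "int main() {"] 1 [] 0 with ⟨o, l, st⟩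
  rw [hE] at h
  unfold pvD at h
  dsimp at h
  dsimp only
  rw [h, show pvIndent 1 ++ "return 0;" = "    return 0;" from by decide]
  simp
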